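-- pv_equiv track=rewrite | github.com/CryZenXs/Projeto_Angela_6.0 | sleep_consolidation.py | _extrair_periodo_amostras
-- ===== SOURCE A (Python) =====
-- def _extrair_periodo_amostras(amostras: list) -> dict:
--     """Extrai período (início/fim) de uma lista de amostras com campo 'ts'."""
--     try:
--         timestamps = [a.get("ts", "") for a in amostras if a.get("ts")]
--         if timestamps:
--             return {"periodo": {"inicio": min(timestamps), "fim": max(timestamps)}}
--     except Exception:
--         pass
--     return {}
-- ===== SOURCE B (Python) =====
-- def _extrair_periodo_amostras(amostras: list) -> dict:
--     """Single pass: fold min/max accumulators instead of building a list and scanning it twice."""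
--     try:
--         inicio = None
--         fim = None
--         for a in amostras:
--             ts = a.get("ts", "")
--             if not ts:
--                 continue
--             if inicio is None:
--                 inicio = ts
--                 fim = ts
--             else:
--                 if ts < inicio:
--                     inicio = ts
--                 if fim < ts:
--                     fim = ts
--         if inicio is not None:
--             return {"periodo": {"inicio": inicio, "fim": fim}}
--     except Exception:
--         pass
--     return {}
-- ===== Notes on version B (the rewrite author's own statement) =====
-- stated objective: alternative
-- what changed: Replaced build-a-timestamp-list then min()+max() (three traversals) with one fold over amostras maintaining inicio/fim accumulators.
import Mathlib
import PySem

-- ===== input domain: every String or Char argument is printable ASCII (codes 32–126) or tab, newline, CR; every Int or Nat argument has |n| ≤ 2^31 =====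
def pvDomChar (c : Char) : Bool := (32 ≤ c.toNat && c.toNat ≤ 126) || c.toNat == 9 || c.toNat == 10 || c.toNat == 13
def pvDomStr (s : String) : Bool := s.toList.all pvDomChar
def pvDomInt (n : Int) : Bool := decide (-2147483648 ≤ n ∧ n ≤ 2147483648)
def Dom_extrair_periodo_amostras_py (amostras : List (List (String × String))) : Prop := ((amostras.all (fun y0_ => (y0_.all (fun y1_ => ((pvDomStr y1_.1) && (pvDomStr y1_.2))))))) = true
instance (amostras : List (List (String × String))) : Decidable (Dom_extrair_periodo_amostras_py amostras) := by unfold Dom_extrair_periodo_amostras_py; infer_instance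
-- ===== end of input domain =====

-- B replaces A's build-a-list-then-min()+max() with a single fold keeping inicio/fim accumulators (alternative decomposition, same O(n) cost).

-- ===== PORT A =====
-- a.get("ts", "") on an association list: first match, default "" (missing key is falsy like "")
def pvGetTs (a : List (String × String)) : String :=
  ((a.find? (fun kv => kv.1 == "ts")).map (·.2)).getD ""

-- [a.get("ts", "") for a in amostras if a.get("ts")]
def pvTsList (amostras : List (List (String × String))) : List String :=
  (amostras.filter (fun a => pvGetTs a ≠ "")).map pvGetTs

def extrair_periodo_amostras_py (amostras : List (List (String × String))) : List (String × List (String × String)) :=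
  let timestamps := pvTsList amostras
  if timestamps.isEmpty then []
  else
    match PySem.List.min? timestamps (fun x => x), PySem.List.max? timestamps (fun x => x) with
    | some mn, some mx => [("periodo", [("inicio", mn), ("fim", mx)])]
    | _, _ => []

-- ===== PORT B =====
-- single pass: fold inicio/fim accumulators over amostras
def pvAltLoop : List (List (String × String)) → Option (String × String) → Option (String × String)
  | [], acc => acc
  | a :: rest, acc =>
    let ts := pvGetTs a
    if ts = "" then pvAltLoop rest acc
    else
      match acc with
      | none => pvAltLoop rest (some (ts, ts))
      | some (lo, hi) =>
          pvAltLoop rest (some ((if ts < lo then ts else lo), (if hi < ts then ts else hi)))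

def extrair_periodo_amostras_py_alt (amostras : List (List (String × String))) : List (String × List (String × String)) :=
  match pvAltLoop amostras none with
  | none => []
  | some (lo, hi) => [("periodo", [("inicio", lo), ("fim", hi)])]

-- ===== PRECONDITION & SPEC =====
def Spec_extrair_periodo_amostras_py (amostras : List (List (String × String))) (out : List (String × List (String × String))) : Prop := out = extrair_periodo_amostras_py_alt amostras
instance (amostras : List (List (String × String))) (out : List (String × List (String × String))) : Decidable (Spec_extrair_periodo_amostras_py amostras out) := by unfold Spec_extrair_periodo_amostras_py; infer_instance

-- ===== CLAIM (what is proved, stated in full; the proofs are below) =====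
def Claim_equal_extrair_periodo_amostras_py : Prop := ∀ (amostras : List (List (String × String))), Dom_extrair_periodo_amostras_py amostras → Spec_extrair_periodo_amostras_py amostras (extrair_periodo_amostras_py amostras)

-- ===== LEMMAS AND PROOFS =====

theorem pv_if_lt_eq_min {α : Type} [LinearOrder α] (a b : α) : (if b < a then b else a) = min a b := by
  rcases lt_or_ge b a with h | h
  · simp [h, min_eq_right h.le]
  · simp [not_lt.mpr h, min_eq_left h]

theorem pv_if_lt_eq_max {α : Type} [LinearOrder α] (a b : α) : (if a < b then b else a) = max a b := by
  rcases lt_or_ge a b with h | h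
  · simp [h, max_eq_right h.le]
  · simp [not_lt.mpr h, max_eq_left h]

theorem pvTsList_cons (a : List (String × String)) (rest : List (List (String × String))) :
    pvTsList (a :: rest) = if pvGetTs a = "" then pvTsList rest else pvGetTs a :: pvTsList rest := by
  simp only [pvTsList, List.filter_cons]
  split_ifs with h <;> simp_all [List.map_cons]

theorem pvAltLoop_some : ∀ (ams : List (List (String × String))) (lo hi : String),
    pvAltLoop ams (some (lo, hi)) = some ((pvTsList ams).foldl min lo, (pvTsList ams).foldl max hi) := by
  intro ams
  induction ams with
  | nil => intro lo hi; simp [pvAltLoop, pvTsList]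
  | cons a rest ih =>
    intro lo hi
    rw [pvTsList_cons]
    by_cases h : pvGetTs a = ""
    · simp [pvAltLoop, h, ih]
    · simp only [pvAltLoop, h, if_false, List.foldl_cons]
      rw [pv_if_lt_eq_min, pv_if_lt_eq_max]
      exact ih _ _

theorem pvAltLoop_none : ∀ (ams : List (List (String × String))),
    pvAltLoop ams none =
      match pvTsList ams with
      | [] => none
      | x :: t => some (t.foldl min x, t.foldl max x) := by
  intro ams
  induction ams with
  | nil => simp [pvAltLoop, pvTsList]
  | cons a rest ih =>
    rw [pvTsList_cons]
    by_cases h : pvGetTs a = ""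
    · simp [pvAltLoop, h, ih]
    · simp only [pvAltLoop, h, if_false]
      rw [pvAltLoop_some]

-- ===== VERDICT (by name: the statement is the Claim_ definition above) =====
theorem extrair_periodo_amostras_py_spec : Claim_equal_extrair_periodo_amostras_py := by
  intro amostras _
  unfold Spec_extrair_periodo_amostras_py extrair_periodo_amostras_py extrair_periodo_amostras_py_alt
  rw [pvAltLoop_none]
  cases hts : pvTsList amostras with
  | nil => simp
  | cons x t =>
      simp [PySem.List.min?_id_cons, PySem.List.max?_id_cons]
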